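-- pv_equiv track=rewrite | github.com/MariusBBerg/puffer-drone-swarm | setup.py | split_flags
-- ===== SOURCE A (Python) =====
-- def split_flags(flags: list[str]) -> tuple[list[str], list[str], list[str], list[str]]:
--     include_dirs: list[str] = []
--     library_dirs: list[str] = []
--     libraries: list[str] = []
--     extras: list[str] = []
--     for flag in flags:
--         if flag.startswith("-I"):
--             include_dirs.append(flag[2:])
--         elif flag.startswith("-L"):
--             library_dirs.append(flag[2:])
--         elif flag.startswith("-l"):
--             libraries.append(flag[2:])
--         else:
--             extras.append(flag)
--     return include_dirs, library_dirs, libraries, extras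
-- ===== SOURCE B (Python) =====
-- def split_flags(flags: list[str]) -> tuple[list[str], list[str], list[str], list[str]]:
--     include_dirs = [f[2:] for f in flags if f.startswith("-I")]
--     library_dirs = [f[2:] for f in flags if not f.startswith("-I") and f.startswith("-L")]
--     libraries = [f[2:] for f in flags if not f.startswith("-I") and not f.startswith("-L") and f.startswith("-l")]
--     extras = [f for f in flags if not (f.startswith("-I") or f.startswith("-L") or f.startswith("-l"))]
--     return include_dirs, library_dirs, libraries, extras
-- ===== Notes on version B (the rewrite author's own statement) =====
-- stated objective: idiomatic
-- what changed: Replaced the single branching pass with four independent filtering comprehensions, one per output category.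
import Mathlib
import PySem

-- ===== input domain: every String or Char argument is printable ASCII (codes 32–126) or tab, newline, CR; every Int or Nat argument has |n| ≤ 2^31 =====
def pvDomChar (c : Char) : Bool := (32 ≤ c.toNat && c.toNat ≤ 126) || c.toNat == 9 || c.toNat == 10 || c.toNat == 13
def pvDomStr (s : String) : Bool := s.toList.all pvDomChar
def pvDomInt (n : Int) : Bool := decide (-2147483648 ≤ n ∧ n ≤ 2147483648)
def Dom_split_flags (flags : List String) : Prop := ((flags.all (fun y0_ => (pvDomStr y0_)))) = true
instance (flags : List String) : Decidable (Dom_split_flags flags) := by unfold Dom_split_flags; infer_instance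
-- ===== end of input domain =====

-- B replaces A's single branching pass by four independent filtering scans (objective: idiomatic).

-- ===== PORT A =====
-- single pass, four accumulators appended to in branch order (A's loop)
def split_flags (flags : List String) : List String × List String × List String × List String :=
  let st := flags.foldl (fun (acc : List String × List String × List String × List String) flag =>
    let (incl, libd, libs, ext) := acc
    if PySem.Str.startswith flag "-I" then (incl ++ [PySem.Str.slice flag (some 2) none], libd, libs, ext)
    else if PySem.Str.startswith flag "-L" then (incl, libd ++ [PySem.Str.slice flag (some 2) none], libs, ext)
    else if PySem.Str.startswith flag "-l" then (incl, libd, libs ++ [PySem.Str.slice flag (some 2) none], ext)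
    else (incl, libd, libs, ext ++ [flag])) ([], [], [], [])
  st

-- ===== PORT B =====
-- four independent scans, one comprehension per category (B's shape)
def split_flags_alt (flags : List String) : List String × List String × List String × List String :=
  ((flags.filter (fun f => PySem.Str.startswith f "-I")).map (fun f => PySem.Str.slice f (some 2) none),
   (flags.filter (fun f => !PySem.Str.startswith f "-I" && PySem.Str.startswith f "-L")).map (fun f => PySem.Str.slice f (some 2) none),
   (flags.filter (fun f => !PySem.Str.startswith f "-I" && !PySem.Str.startswith f "-L" && PySem.Str.startswith f "-l")).map (fun f => PySem.Str.slice f (some 2) none),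
   flags.filter (fun f => !(PySem.Str.startswith f "-I" || PySem.Str.startswith f "-L" || PySem.Str.startswith f "-l")))

-- ===== PRECONDITION & SPEC =====
def Spec_split_flags (flags : List String) (out : List String × List String × List String × List String) : Prop := out = split_flags_alt flags
instance (flags : List String) (out : List String × List String × List String × List String) : Decidable (Spec_split_flags flags out) := by unfold Spec_split_flags; infer_instance

-- ===== CLAIM (what is proved, stated in full; the proofs are below) =====
def Claim_equal_split_flags : Prop := ∀ (flags : List String), Dom_split_flags flags → Spec_split_flags flags (split_flags flags)

-- ===== LEMMAS AND PROOFS =====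
theorem split_flags_foldl (flags i l lb e : List String) :
    flags.foldl (fun (acc : List String × List String × List String × List String) flag =>
      let (incl, libd, libs, ext) := acc
      if PySem.Str.startswith flag "-I" then (incl ++ [PySem.Str.slice flag (some 2) none], libd, libs, ext)
      else if PySem.Str.startswith flag "-L" then (incl, libd ++ [PySem.Str.slice flag (some 2) none], libs, ext)
      else if PySem.Str.startswith flag "-l" then (incl, libd, libs ++ [PySem.Str.slice flag (some 2) none], ext)
      else (incl, libd, libs, ext ++ [flag])) (i, l, lb, e) =
    (i ++ (flags.filter (fun f => PySem.Str.startswith f "-I")).map (fun f => PySem.Str.slice f (some 2) none),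
     l ++ (flags.filter (fun f => !PySem.Str.startswith f "-I" && PySem.Str.startswith f "-L")).map (fun f => PySem.Str.slice f (some 2) none),
     lb ++ (flags.filter (fun f => !PySem.Str.startswith f "-I" && !PySem.Str.startswith f "-L" && PySem.Str.startswith f "-l")).map (fun f => PySem.Str.slice f (some 2) none),
     e ++ flags.filter (fun f => !(PySem.Str.startswith f "-I" || PySem.Str.startswith f "-L" || PySem.Str.startswith f "-l"))) := by
  induction flags generalizing i l lb e with
  | nil => simp
  | cons f fs ih =>
    simp only [List.foldl_cons, List.filter_cons]
    by_cases hI : PySem.Str.startswith f "-I" <;>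
      by_cases hL : PySem.Str.startswith f "-L" <;>
        by_cases hl : PySem.Str.startswith f "-l" <;>
          simp_all

-- ===== VERDICT (by name: the statement is the Claim_ definition above) =====
theorem split_flags_spec : Claim_equal_split_flags := by
  intro flags _
  show split_flags flags = split_flags_alt flags
  have h := split_flags_foldl flags [] [] [] []
  simpa [split_flags, split_flags_alt] using h
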